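-- pv_equiv track=rewrite | github.com/yjhoon2/Coding_test | Programmers/Level3/최고의_집합.py | solution
-- ===== SOURCE A (Python) =====
-- def solution(n, s):
--     a, b = divmod(s, n)
--     answer = [a] * n
--     if a == 0:
--         return [-1]
--     for i in range(b):
--         answer[i] += 1
--     answer.sort()
--     return answer
-- ===== SOURCE B (Python) =====
-- def solution(n, s):
--     a, b = divmod(s, n)
--     if a == 0:
--         return [-1]
--     return [a] * (n - b) + [a + 1] * b
-- ===== Notes on version B (the rewrite author's own statement) =====
-- stated objective: simpler
-- what changed: Replaces the build-then-mutate-then-sort pipeline (allocate [a]*n, increment the first b slots in a Python-level loop, sort) by a direct closed-form construction of the ascending answer as (n-b) copies of a followed by b copies of a+1, with no loop and no sort.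
import Mathlib
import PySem

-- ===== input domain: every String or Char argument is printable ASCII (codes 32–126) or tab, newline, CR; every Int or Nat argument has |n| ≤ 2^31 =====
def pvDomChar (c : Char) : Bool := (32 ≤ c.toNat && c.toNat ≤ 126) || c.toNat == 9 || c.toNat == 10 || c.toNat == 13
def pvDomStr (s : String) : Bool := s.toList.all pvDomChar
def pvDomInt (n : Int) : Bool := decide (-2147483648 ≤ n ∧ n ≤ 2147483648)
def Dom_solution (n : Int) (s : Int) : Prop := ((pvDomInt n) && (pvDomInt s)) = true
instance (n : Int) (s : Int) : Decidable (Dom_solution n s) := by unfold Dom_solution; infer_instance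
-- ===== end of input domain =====

-- B replaces A's allocate-[a]*n / increment-first-b-slots loop / sort pipeline by a
-- direct closed-form construction of the ascending answer (no per-element loop, no sort); objective: simpler.


-- ===== PORT A =====
-- [a] * n : Python list repetition yields [] for n ≤ 0, matching toNat's clamp (exact).
-- answer[i] += 1 is read-then-write at index i; ported with pyGetD/pySetD (exact under
-- Pre_solution: the loop indices 0 ≤ i < b are always in range, see mod bounds below).
def solution (n : Int) (s : Int) : List Int :=
  let a := PySem.Int.floordiv s n
  let b := PySem.Int.mod s n
  let answer := List.replicate n.toNat a
  if a = 0 then [-1]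
  else
    let answer := (PySem.List.pyRange 0 b 1).foldl
      (fun ans i => PySem.List.pySetD ans i (PySem.List.pyGetD ans i 0 + 1)) answer
    PySem.List.sorted answer id

-- ===== PORT B =====
-- Source B: [a] * (n - b) + [a + 1] * b (Python repetition clamps negative counts to []).
def solution_alt (n : Int) (s : Int) : List Int :=
  let a := PySem.Int.floordiv s n
  let b := PySem.Int.mod s n
  if a = 0 then [-1]
  else List.replicate (n - b).toNat a ++ List.replicate b.toNat (a + 1)

-- ===== PRECONDITION & SPEC =====
-- Python's divmod(s, n) raises ZeroDivisionError for n = 0; exactly that is excluded.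
def Pre_solution (n : Int) (s : Int) : Prop := n ≠ 0
instance (n : Int) (s : Int) : Decidable (Pre_solution n s) := by unfold Pre_solution; infer_instance
def pvWitness_solution : Int × Int := (3, 7)

def Spec_solution (n : Int) (s : Int) (out : List Int) : Prop := out = solution_alt n s
instance (n : Int) (s : Int) (out : List Int) : Decidable (Spec_solution n s out) := by unfold Spec_solution; infer_instance

-- ===== CLAIM (what is proved, stated in full; the proofs are below) =====
def Claim_equal_solution : Prop := ∀ (n : Int) (s : Int), Dom_solution n s → Pre_solution n s → Spec_solution n s (solution n s)

-- ===== LEMMAS AND PROOFS =====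

theorem fmod_pos_bounds (s n : Int) (h : 0 < n) : 0 ≤ s.fmod n ∧ s.fmod n < n := by
  rw [Int.fmod_eq_emod]
  have h1 := Int.emod_nonneg s h.ne'
  have h2 := Int.emod_lt_of_pos s h
  simp [h.le]; omega

theorem fmod_neg_bounds (s n : Int) (h : n < 0) : n < s.fmod n ∧ s.fmod n ≤ 0 := by
  rw [Int.fmod_eq_emod]
  have h1 := Int.emod_nonneg s h.ne
  have h2 : s % n < -n := by
    have := Int.emod_lt_of_pos s (b := -n) (by omega)
    rwa [Int.emod_neg] at this
  by_cases hd : n ∣ s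
  · have : s % n = 0 := Int.emod_eq_zero_of_dvd hd
    simp only [if_pos (Or.inr hd)]; omega
  · have : ¬ (0 ≤ n ∨ n ∣ s) := by omega
    rw [if_neg this]; omega

theorem set_append_cons {α : Type} (l1 : List α) (x : α) (t : List α) (v : α) :
    (l1 ++ x :: t).set l1.length v = l1 ++ v :: t := by
  induction l1 with
  | nil => simp
  | cons y ys ih => simp [ih]

theorem getD_append_cons {α : Type} (l1 : List α) (x : α) (t : List α) (d : α) :
    PySem.List.pyGetD (l1 ++ x :: t) (l1.length : Int) d = x := by
  simp [PySem.List.pyGetD, PySem.List.pyGet?, PySem.List.pyIdx?]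

theorem loop_replicate (a : Int) (k m : Nat) (hk : k ≤ m) :
    (PySem.List.pyRange 0 (k : Int) 1).foldl
      (fun ans i => PySem.List.pySetD ans i (PySem.List.pyGetD ans i 0 + 1))
      (List.replicate m a)
    = List.replicate k (a + 1) ++ List.replicate (m - k) a := by
  induction k with
  | zero => simp [PySem.List.pyRange_one_eq_nil]
  | succ j ih =>
    have hj : j ≤ m := Nat.le_of_succ_le hk
    have hrange : PySem.List.pyRange 0 ((j : Int) + 1) 1
        = PySem.List.pyRange 0 (j : Int) 1 ++ [(j : Int)] := by
      exact PySem.List.pyRange_one_succ_right (by positivity)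
    have hcast : ((Nat.succ j : Nat) : Int) = (j : Int) + 1 := by push_cast; ring
    rw [hcast, hrange, List.foldl_append, ih hj]
    have hsplit : List.replicate (m - j) a = a :: List.replicate (m - j - 1) a := by
      rw [← List.replicate_succ]
      congr 1; omega
    rw [hsplit]
    have hlen : (j : Int) = ((List.replicate j (a + 1)).length : Int) := by simp
    simp only [List.foldl_cons, List.foldl_nil, hlen,
      getD_append_cons, PySem.List.pySetD_natCast]
    rw [set_append_cons, show List.replicate (Nat.succ j) (a + 1) = List.replicate j (a + 1) ++ [a + 1] by
      simp [List.replicate_succ']]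
    simp only [List.append_assoc, List.singleton_append]
    congr 2 <;> omega

theorem pairwise_rep_rep (a : Int) (p q : Nat) :
    List.Pairwise (fun x y => x ≤ y) (List.replicate p a ++ List.replicate q (a + 1)) := by
  rw [List.pairwise_append]
  refine ⟨?_, ?_, ?_⟩
  · exact List.pairwise_replicate.mpr (Or.inr (le_refl a))
  · exact List.pairwise_replicate.mpr (Or.inr (le_refl _))
  · intro x hx y hy
    rw [List.eq_of_mem_replicate hx, List.eq_of_mem_replicate hy]; omega

theorem sorted_rep_rep (a : Int) (p q : Nat) :
    PySem.List.sorted (List.replicate q (a + 1) ++ List.replicate p a) id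
      = List.replicate p a ++ List.replicate q (a + 1) := by
  apply List.eq_of_perm_of_sorted (le := fun x y => x ≤ y)
  · intro x y _ _ h1 h2; omega
  · have := PySem.List.sorted_pairwise (List.replicate q (a + 1) ++ List.replicate p a) id
    simpa using this
  · exact pairwise_rep_rep a p q
  · exact (PySem.List.sorted_perm _ _ _).trans List.perm_append_comm

-- ===== VERDICT (by name: the statement is the Claim_ definition above) =====
theorem solution_spec : Claim_equal_solution := by
  intro n s _ hpre
  unfold Spec_solution solution solution_alt
  simp only [PySem.Int.floordiv, PySem.Int.mod]
  by_cases ha : s.fdiv n = 0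
  · simp [ha]
  · simp only [if_neg ha]
    rcases lt_or_gt_of_ne hpre with hn | hn
    · -- n < 0 : everything is empty on both sides
      obtain ⟨hb1, hb2⟩ := fmod_neg_bounds s n hn
      have hrange : PySem.List.pyRange 0 (s.fmod n) 1 = [] :=
        PySem.List.pyRange_one_eq_nil hb2
      have hrep : n.toNat = 0 := by omega
      have hrep2 : (n - s.fmod n).toNat = 0 := by omega
      have hrep3 : (s.fmod n).toNat = 0 := by omega
      simp [hrange, hrep, hrep2, hrep3, PySem.List.sorted]
    · -- n > 0 : A's loop yields b copies of a+1 then n-b copies of a; sorting reverses the blocks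
      obtain ⟨hb1, hb2⟩ := fmod_pos_bounds s n hn
      have hcast : (s.fmod n) = ((s.fmod n).toNat : Int) := by omega
      rw [hcast, loop_replicate _ _ _ (by omega)]
      rw [sorted_rep_rep]
      congr 2
      omega
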